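-- pv_equiv track=rewrite | github.com/JARVIS-28/agentic-canteen-dss | backend/services/calendar_service.py | normalize_event_type
-- ===== SOURCE A (Python) =====
-- from typing import Optional, List, Dict, Any
--
-- ALLOWED_CALENDAR_EVENT_TYPES = {"Holiday", "Exam", "Cultural", "Sports_Day", "Workshop", "Other", "Festival"}
--
-- def normalize_event_type(value: Optional[str], default: str = "Festival") -> str:
--     if not value:
--         return default
--     candidate = str(value).strip().lower()
--
--     if "sport" in candidate: return "Sports_Day"
--     if any(x in candidate for x in ["exam", "isa", "ia", "assessment", "esa", "fe", "ria", "test", "quiz"]): return "Exam"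
--     if any(x in candidate for x in ["holiday", "closed", "vacation"]): return "Holiday"
--     if any(x in candidate for x in ["cultural", "fest", "celebration", "maatru"]): return "Cultural"
--     if any(x in candidate for x in ["workshop", "seminar", "symposium"]): return "Workshop"
--     if any(x in candidate for x in ["ptm", "meeting", "parent", "commencement", "posting", "registration", "results", "lwd", "last working day", "study holiday", "remedial"]): return "Other"
--
--     # Check if it matches exactly after capitalization
--     cap = candidate.capitalize()
--     if cap in ALLOWED_CALENDAR_EVENT_TYPES:
--         return cap
--
--     return default
-- ===== SOURCE B (Python) =====
-- ALLOWED_CALENDAR_EVENT_TYPES = {"Holiday", "Exam", "Cultural", "Sports_Day", "Workshop", "Other", "Festival"}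
--
-- LABELS = ["Sports_Day", "Exam", "Holiday", "Cultural", "Workshop", "Other"]
--
-- # flat keyword -> priority table (priority = index into LABELS, A's cascade order)
-- KEYWORDS = [
--     ("sport", 0),
--     ("exam", 1), ("isa", 1), ("ia", 1), ("assessment", 1), ("esa", 1),
--     ("fe", 1), ("ria", 1), ("test", 1), ("quiz", 1),
--     ("holiday", 2), ("closed", 2), ("vacation", 2),
--     ("cultural", 3), ("fest", 3), ("celebration", 3), ("maatru", 3),
--     ("workshop", 4), ("seminar", 4), ("symposium", 4),
--     ("ptm", 5), ("meeting", 5), ("parent", 5), ("commencement", 5),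
--     ("posting", 5), ("registration", 5), ("results", 5), ("lwd", 5),
--     ("last working day", 5), ("study holiday", 5), ("remedial", 5),
-- ]
--
-- def normalize_event_type(value, default="Festival"):
--     if not value:
--         return default
--     candidate = str(value).strip().lower()
--     # single positional scan: at each start position, test keyword prefixes,
--     # keep the minimum priority seen anywhere
--     best = len(LABELS)
--     for i in range(len(candidate) + 1):
--         tail = candidate[i:]
--         for kw, pr in KEYWORDS:
--             if tail.startswith(kw):
--                 best = min(best, pr)
--     if best < len(LABELS):
--         return LABELS[best]
--     cap = candidate.capitalize()
--     return cap if cap in ALLOWED_CALENDAR_EVENT_TYPES else default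
-- ===== Notes on version B (the rewrite author's own statement) =====
-- stated objective: alternative
-- what changed: Replaces the cascade of per-keyword substring membership tests with a single positional scan of the candidate: at each start position it tests prefixes against one flat keyword-to-priority table and maintains a running minimum priority; the least-priority label (the first matching rule of the cascade) wins, with the same capitalize fallback.
import Mathlib
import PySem

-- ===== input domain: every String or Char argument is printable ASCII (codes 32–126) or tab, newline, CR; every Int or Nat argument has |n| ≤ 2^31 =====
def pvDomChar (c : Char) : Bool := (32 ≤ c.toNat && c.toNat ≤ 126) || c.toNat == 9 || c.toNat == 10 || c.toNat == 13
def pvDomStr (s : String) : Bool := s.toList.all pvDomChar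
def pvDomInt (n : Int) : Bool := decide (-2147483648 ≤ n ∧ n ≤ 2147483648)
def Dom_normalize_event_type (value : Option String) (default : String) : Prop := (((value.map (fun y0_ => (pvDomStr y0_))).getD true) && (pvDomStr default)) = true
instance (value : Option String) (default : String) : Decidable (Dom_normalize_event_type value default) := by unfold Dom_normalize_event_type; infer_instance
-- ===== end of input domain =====

-- B replaces A's cascade of per-keyword substring tests with one positional scan of the
-- candidate keeping a minimum-priority accumulator over a flat keyword table (alternative;
-- same behaviour, same cost).

-- str.capitalize(): first char uppercased, rest lowercased (exact on ASCII; hand port, no PySem primitive)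
def pyCapitalize (s : String) : String :=
  match s.toList with
  | [] => ""
  | c :: cs => String.ofList (PySem.Chars.upperChar c :: cs.map PySem.Chars.lowerChar)

-- ===== PORT A =====
def normalize_event_type (value : Option String) (default : String) : String :=
  match value with
  | none => default
  | some s =>
    if s = "" then default
    else
      let candidate := PySem.Str.lower (PySem.Str.strip s)
      if PySem.Str.isIn "sport" candidate then "Sports_Day"
      else if (["exam", "isa", "ia", "assessment", "esa", "fe", "ria", "test", "quiz"].any
                (fun x => PySem.Str.isIn x candidate)) then "Exam"
      else if (["holiday", "closed", "vacation"].any (fun x => PySem.Str.isIn x candidate)) then "Holiday"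
      else if (["cultural", "fest", "celebration", "maatru"].any (fun x => PySem.Str.isIn x candidate)) then "Cultural"
      else if (["workshop", "seminar", "symposium"].any (fun x => PySem.Str.isIn x candidate)) then "Workshop"
      else if (["ptm", "meeting", "parent", "commencement", "posting", "registration",
                "results", "lwd", "last working day", "study holiday", "remedial"].any
                (fun x => PySem.Str.isIn x candidate)) then "Other"
      else
        let cap := pyCapitalize candidate
        if ["Holiday", "Exam", "Cultural", "Sports_Day", "Workshop", "Other", "Festival"].contains cap
        then cap
        else default

-- ===== PORT B =====
def pvLabels : List String := ["Sports_Day", "Exam", "Holiday", "Cultural", "Workshop", "Other"]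

-- flat keyword -> priority table (priority = index into pvLabels)
def pvKeywords : List (List Char × Nat) :=
  [ ("sport".toList, 0),
    ("exam".toList, 1), ("isa".toList, 1), ("ia".toList, 1), ("assessment".toList, 1), ("esa".toList, 1),
    ("fe".toList, 1), ("ria".toList, 1), ("test".toList, 1), ("quiz".toList, 1),
    ("holiday".toList, 2), ("closed".toList, 2), ("vacation".toList, 2),
    ("cultural".toList, 3), ("fest".toList, 3), ("celebration".toList, 3), ("maatru".toList, 3),
    ("workshop".toList, 4), ("seminar".toList, 4), ("symposium".toList, 4),
    ("ptm".toList, 5), ("meeting".toList, 5), ("parent".toList, 5), ("commencement".toList, 5),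
    ("posting".toList, 5), ("registration".toList, 5), ("results".toList, 5), ("lwd".toList, 5),
    ("last working day".toList, 5), ("study holiday".toList, 5), ("remedial".toList, 5) ]

def normalize_event_type_alt (value : Option String) (default : String) : String :=
  match value with
  | none => default
  | some s =>
    if s = "" then default
    else
      let candidate := PySem.Str.lower (PySem.Str.strip s)
      let cs := candidate.toList
      -- single positional scan keeping the minimum priority seen anywhere
      let best := (List.range (cs.length + 1)).foldl
        (fun b i => pvKeywords.foldl
          (fun b p => if PySem.Chars.startswith (cs.drop i) p.1 then min b p.2 else b) b) 6
      if best < 6 then pvLabels.getD best default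
      else
        let cap := pyCapitalize candidate
        if ["Holiday", "Exam", "Cultural", "Sports_Day", "Workshop", "Other", "Festival"].contains cap
        then cap
        else default

-- ===== PRECONDITION & SPEC =====
def Spec_normalize_event_type (value : Option String) (default : String) (out : String) : Prop := out = normalize_event_type_alt value default
instance (value : Option String) (default : String) (out : String) : Decidable (Spec_normalize_event_type value default out) := by unfold Spec_normalize_event_type; infer_instance

-- ===== CLAIM (what is proved, stated in full; the proofs are below) =====
def Claim_equal_normalize_event_type : Prop := ∀ (value : Option String) (default : String), Dom_normalize_event_type value default → Spec_normalize_event_type value default (normalize_event_type value default)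

-- ===== LEMMAS AND PROOFS =====

-- rule k matches the candidate (some keyword of priority k occurs as a substring)
def ruleMatch (cs : List Char) (k : Nat) : Prop :=
  ∃ p ∈ pvKeywords, p.2 = k ∧ PySem.Chars.isIn p.1 cs = true

-- the inner fold computes a lower bound / achieves its value
theorem inner_spec (cs : List Char) (i : Nat) :
    ∀ (L : List (List Char × Nat)) (b : Nat),
      (L.foldl (fun b p => if PySem.Chars.startswith (cs.drop i) p.1 then min b p.2 else b) b = b ∨
        ∃ p ∈ L, PySem.Chars.startswith (cs.drop i) p.1 = true ∧
          L.foldl (fun b p => if PySem.Chars.startswith (cs.drop i) p.1 then min b p.2 else b) b = p.2) ∧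
      L.foldl (fun b p => if PySem.Chars.startswith (cs.drop i) p.1 then min b p.2 else b) b ≤ b ∧
      (∀ p ∈ L, PySem.Chars.startswith (cs.drop i) p.1 = true →
        L.foldl (fun b p => if PySem.Chars.startswith (cs.drop i) p.1 then min b p.2 else b) b ≤ p.2) := by
  intro L
  induction L with
  | nil => intro b; exact ⟨Or.inl rfl, le_refl b, by simp⟩
  | cons q L ih =>
    intro b
    simp only [List.foldl_cons]
    set b' := if PySem.Chars.startswith (cs.drop i) q.1 then min b q.2 else b with hb'
    obtain ⟨h1, h2, h3⟩ := ih b'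
    have hb'le : b' ≤ b := by
      by_cases h : PySem.Chars.startswith (cs.drop i) q.1 <;> simp [hb', h]
    refine ⟨?_, le_trans h2 hb'le, ?_⟩
    · rcases h1 with h1 | ⟨p, hp, hsw, hval⟩
      · by_cases h : PySem.Chars.startswith (cs.drop i) q.1 = true
        · rcases Nat.le_total b q.2 with hm | hm
          · exact Or.inl (by rw [h1]; simp [hb', h, Nat.min_eq_left hm])
          · exact Or.inr ⟨q, by simp, h, by rw [h1]; simp [hb', h, Nat.min_eq_right hm]⟩
        · exact Or.inl (by rw [h1]; simp [hb', h])
      · exact Or.inr ⟨p, List.mem_cons_of_mem _ hp, hsw, hval⟩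
    · intro p hp hsw
      rcases List.mem_cons.mp hp with rfl | hp'
      · have : b' ≤ p.2 := by simp [hb', hsw]
        exact le_trans h2 this
      · exact h3 p hp' hsw

-- the double fold: lower bound / achievement over all positions
theorem outer_spec (cs : List Char) :
    ∀ (I : List Nat) (b : Nat),
      (I.foldl (fun b i => pvKeywords.foldl
          (fun b p => if PySem.Chars.startswith (cs.drop i) p.1 then min b p.2 else b) b) b = b ∨
        ∃ i ∈ I, ∃ p ∈ pvKeywords, PySem.Chars.startswith (cs.drop i) p.1 = true ∧
          I.foldl (fun b i => pvKeywords.foldl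
            (fun b p => if PySem.Chars.startswith (cs.drop i) p.1 then min b p.2 else b) b) b = p.2) ∧
      I.foldl (fun b i => pvKeywords.foldl
          (fun b p => if PySem.Chars.startswith (cs.drop i) p.1 then min b p.2 else b) b) b ≤ b ∧
      (∀ i ∈ I, ∀ p ∈ pvKeywords, PySem.Chars.startswith (cs.drop i) p.1 = true →
        I.foldl (fun b i => pvKeywords.foldl
          (fun b p => if PySem.Chars.startswith (cs.drop i) p.1 then min b p.2 else b) b) b ≤ p.2) := by
  intro I
  induction I with
  | nil => intro b; exact ⟨Or.inl rfl, le_refl b, by simp⟩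
  | cons j I ih =>
    intro b
    simp only [List.foldl_cons]
    set b' := pvKeywords.foldl
      (fun b p => if PySem.Chars.startswith (cs.drop j) p.1 then min b p.2 else b) b with hb'
    obtain ⟨h1, h2, h3⟩ := ih b'
    obtain ⟨g1, g2, g3⟩ := inner_spec cs j pvKeywords b
    refine ⟨?_, le_trans h2 g2, ?_⟩
    · rcases h1 with h1 | ⟨i, hi, p, hp, hsw, hval⟩
      · rcases g1 with g1 | ⟨p, hp, hsw, hval⟩
        · exact Or.inl (by rw [h1]; exact g1)
        · exact Or.inr ⟨j, by simp, p, hp, hsw, by rw [h1]; exact hval⟩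
      · exact Or.inr ⟨i, List.mem_cons_of_mem _ hi, p, hp, hsw, hval⟩
    · intro i hi p hp hsw
      rcases List.mem_cons.mp hi with rfl | hi'
      · exact le_trans h2 (g3 p hp hsw)
      · exact h3 i hi' p hp hsw

-- a prefix-at-some-position witness can be clamped into range (len+1), and conversely
theorem startswith_pos_iff_isIn (cs kw : List Char) :
    (∃ i ∈ List.range (cs.length + 1), PySem.Chars.startswith (cs.drop i) kw = true) ↔
      PySem.Chars.isIn kw cs = true := by
  rw [← PySem.Chars.exists_prefix_drop_iff_isIn]
  constructor
  · rintro ⟨i, _, hsw⟩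
    exact ⟨i, (PySem.Chars.startswith_iff _ _).mp hsw⟩
  · rintro ⟨j, hpre⟩
    refine ⟨min j cs.length, ?_, ?_⟩
    · simp [List.mem_range]
    · rw [PySem.Chars.startswith_iff]
      rcases Nat.le_total j cs.length with h | h
      · rwa [min_eq_left h]
      · rw [min_eq_right h]
        have h1 : cs.drop j = [] := List.drop_eq_nil_of_le h
        have h2 : cs.drop cs.length = [] := List.drop_eq_nil_of_le (le_refl _)
        rw [h2, ← h1]; exact hpre

-- characterisation of B's accumulator: it is 6 or the least matching priority
theorem best_spec (cs : List Char) :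
    let best := (List.range (cs.length + 1)).foldl
      (fun b i => pvKeywords.foldl
        (fun b p => if PySem.Chars.startswith (cs.drop i) p.1 then min b p.2 else b) b) 6
    best ≤ 6 ∧ (best = 6 ∨ ruleMatch cs best) ∧ (∀ k, ruleMatch cs k → best ≤ k) := by
  intro best
  obtain ⟨h1, h2, h3⟩ := outer_spec cs (List.range (cs.length + 1)) 6
  refine ⟨h2, ?_, ?_⟩
  · rcases h1 with h1 | ⟨i, hi, p, hp, hsw, hval⟩
    · exact Or.inl h1
    · refine Or.inr ⟨p, hp, hval.symm, ?_⟩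
      exact (startswith_pos_iff_isIn cs p.1).mp ⟨i, hi, hsw⟩
  · rintro k ⟨p, hp, hk, hin⟩
    obtain ⟨i, hi, hsw⟩ := (startswith_pos_iff_isIn cs p.1).mpr hin
    calc best ≤ p.2 := h3 i hi p hp hsw
      _ = k := hk

theorem keywords_pr_le (p : List Char × Nat) (hp : p ∈ pvKeywords) : p.2 ≤ 5 := by
  fin_cases hp <;> decide

-- core equality on an arbitrary candidate string
theorem normalize_core (cand default : String) :
    (if PySem.Str.isIn "sport" cand then "Sports_Day"
     else if (["exam", "isa", "ia", "assessment", "esa", "fe", "ria", "test", "quiz"].any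
               (fun x => PySem.Str.isIn x cand)) then "Exam"
     else if (["holiday", "closed", "vacation"].any (fun x => PySem.Str.isIn x cand)) then "Holiday"
     else if (["cultural", "fest", "celebration", "maatru"].any (fun x => PySem.Str.isIn x cand)) then "Cultural"
     else if (["workshop", "seminar", "symposium"].any (fun x => PySem.Str.isIn x cand)) then "Workshop"
     else if (["ptm", "meeting", "parent", "commencement", "posting", "registration",
               "results", "lwd", "last working day", "study holiday", "remedial"].any
               (fun x => PySem.Str.isIn x cand)) then "Other"
     else if ["Holiday", "Exam", "Cultural", "Sports_Day", "Workshop", "Other", "Festival"].contains (pyCapitalize cand)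
     then pyCapitalize cand else default) =
    (if (List.range (cand.toList.length + 1)).foldl
       (fun b i => pvKeywords.foldl
         (fun b p => if PySem.Chars.startswith (cand.toList.drop i) p.1 then min b p.2 else b) b) 6 < 6
     then pvLabels.getD ((List.range (cand.toList.length + 1)).foldl
       (fun b i => pvKeywords.foldl
         (fun b p => if PySem.Chars.startswith (cand.toList.drop i) p.1 then min b p.2 else b) b) 6) default
     else if ["Holiday", "Exam", "Cultural", "Sports_Day", "Workshop", "Other", "Festival"].contains (pyCapitalize cand)
     then pyCapitalize cand else default) := by
  set cs := cand.toList with hcs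
  obtain ⟨hle, hach, hmin⟩ := best_spec cs
  set best := (List.range (cs.length + 1)).foldl
    (fun b i => pvKeywords.foldl
      (fun b p => if PySem.Chars.startswith (cs.drop i) p.1 then min b p.2 else b) b) 6 with hbest
  have hM0 : ruleMatch cs 0 ↔ PySem.Str.isIn "sport" cand = true := by
    unfold ruleMatch; simp [pvKeywords, PySem.Str.isIn_eq, hcs]
  have hM1 : ruleMatch cs 1 ↔ (["exam", "isa", "ia", "assessment", "esa", "fe", "ria", "test", "quiz"].any
      (fun x => PySem.Str.isIn x cand)) = true := by
    unfold ruleMatch; simp [pvKeywords, PySem.Str.isIn_eq, hcs]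
  have hM2 : ruleMatch cs 2 ↔ (["holiday", "closed", "vacation"].any (fun x => PySem.Str.isIn x cand)) = true := by
    unfold ruleMatch; simp [pvKeywords, PySem.Str.isIn_eq, hcs]
  have hM3 : ruleMatch cs 3 ↔ (["cultural", "fest", "celebration", "maatru"].any (fun x => PySem.Str.isIn x cand)) = true := by
    unfold ruleMatch; simp [pvKeywords, PySem.Str.isIn_eq, hcs]
  have hM4 : ruleMatch cs 4 ↔ (["workshop", "seminar", "symposium"].any (fun x => PySem.Str.isIn x cand)) = true := by
    unfold ruleMatch; simp [pvKeywords, PySem.Str.isIn_eq, hcs]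
  have hM5 : ruleMatch cs 5 ↔ (["ptm", "meeting", "parent", "commencement", "posting", "registration",
      "results", "lwd", "last working day", "study holiday", "remedial"].any
      (fun x => PySem.Str.isIn x cand)) = true := by
    unfold ruleMatch; simp [pvKeywords, PySem.Str.isIn_eq, hcs]
  have hub : best = 6 ∨ best ≤ 5 := by
    rcases hach with h | ⟨p, hp, hk, _⟩
    · exact Or.inl h
    · exact Or.inr (hk ▸ keywords_pr_le p hp)
  have hne : ∀ k, k ≤ 5 → ¬ ruleMatch cs k → best ≠ k := by
    intro k hk hn e
    rcases hach with h | h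
    · omega
    · exact hn (e ▸ h)
  by_cases h0 : PySem.Str.isIn "sport" cand = true
  · have hb : best = 0 := Nat.le_zero.mp (hmin 0 (hM0.mpr h0))
    rw [if_pos h0, hb]; rfl
  · have hn0 : ¬ ruleMatch cs 0 := fun h => h0 (hM0.mp h)
    have e0 := hne 0 (by omega) hn0
    by_cases h1 : (["exam", "isa", "ia", "assessment", "esa", "fe", "ria", "test", "quiz"].any
        (fun x => PySem.Str.isIn x cand)) = true
    · have hb : best = 1 := by have := hmin 1 (hM1.mpr h1); omega
      rw [if_neg h0, if_pos h1, hb]; rfl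
    · have hn1 : ¬ ruleMatch cs 1 := fun h => h1 (hM1.mp h)
      have e1 := hne 1 (by omega) hn1
      by_cases h2 : (["holiday", "closed", "vacation"].any (fun x => PySem.Str.isIn x cand)) = true
      · have hb : best = 2 := by have := hmin 2 (hM2.mpr h2); omega
        rw [if_neg h0, if_neg h1, if_pos h2, hb]; rfl
      · have hn2 : ¬ ruleMatch cs 2 := fun h => h2 (hM2.mp h)
        have e2 := hne 2 (by omega) hn2
        by_cases h3 : (["cultural", "fest", "celebration", "maatru"].any (fun x => PySem.Str.isIn x cand)) = true
        · have hb : best = 3 := by have := hmin 3 (hM3.mpr h3); omega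
          rw [if_neg h0, if_neg h1, if_neg h2, if_pos h3, hb]; rfl
        · have hn3 : ¬ ruleMatch cs 3 := fun h => h3 (hM3.mp h)
          have e3 := hne 3 (by omega) hn3
          by_cases h4 : (["workshop", "seminar", "symposium"].any (fun x => PySem.Str.isIn x cand)) = true
          · have hb : best = 4 := by have := hmin 4 (hM4.mpr h4); omega
            rw [if_neg h0, if_neg h1, if_neg h2, if_neg h3, if_pos h4, hb]; rfl
          · have hn4 : ¬ ruleMatch cs 4 := fun h => h4 (hM4.mp h)
            have e4 := hne 4 (by omega) hn4
            by_cases h5 : (["ptm", "meeting", "parent", "commencement", "posting", "registration",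
                "results", "lwd", "last working day", "study holiday", "remedial"].any
                (fun x => PySem.Str.isIn x cand)) = true
            · have hb : best = 5 := by have := hmin 5 (hM5.mpr h5); omega
              rw [if_neg h0, if_neg h1, if_neg h2, if_neg h3, if_neg h4, if_pos h5, hb]; rfl
            · have hn5 : ¬ ruleMatch cs 5 := fun h => h5 (hM5.mp h)
              have e5 := hne 5 (by omega) hn5
              have hb : best = 6 := by rcases hub with h | h <;> omega
              rw [if_neg h0, if_neg h1, if_neg h2, if_neg h3, if_neg h4, if_neg h5, hb]; rfl

-- ===== VERDICT (by name: the statement is the Claim_ definition above) =====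
theorem normalize_event_type_spec : Claim_equal_normalize_event_type := by
  intro value default _
  unfold Spec_normalize_event_type normalize_event_type normalize_event_type_alt
  cases value with
  | none => rfl
  | some s =>
    by_cases hs : s = ""
    · simp only [hs, if_pos]
    · dsimp only
      rw [if_neg hs, if_neg hs]
      exact normalize_core (PySem.Str.lower (PySem.Str.strip s)) default
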